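-- pv_equiv track=rewrite | github.com/imdthlinh/CTDT-GT-pluss | bai1/11vitriphantu.py | tinh_XY
-- ===== SOURCE A (Python) =====
-- def tinh_XY(n):
--     X = [0] * (n + 1)
--     Y = [0] * (n + 1)
--
--     X[0] = 1
--     Y[0] = 0
--
--     for i in range(1, n + 1):
--         X[i] = X[i - 1] + Y[i - 1]
--         Y[i] = 3 * X[i - 1] + Y[i - 1]
--
--     return X, Y
-- ===== SOURCE B (Python) =====
-- def tinh_XY(n):
--     if n < 0:
--         return [], []
--     xx = [1, 1]
--     for _ in range(n):
--         xx.append(2 * xx[-1] + 2 * xx[-2])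
--     X = xx[:n + 1]
--     Y = [xx[i + 1] - xx[i] for i in range(n + 1)]
--     return X, Y
-- ===== Notes on version B (the rewrite author's own statement) =====
-- stated objective: alternative
-- what changed: Replaced the coupled X/Y recurrence over two preallocated arrays by one second-order recurrence X[i]=2*X[i-1]+2*X[i-2] grown by append, with Y recovered as consecutive differences of X.
-- crash fix: For n < 0 A raises IndexError (X[0]=1 on an empty list) while B returns ([], []). — e.g. on tinh_XY(-1): A raises IndexError, B returns ([], [])
import Mathlib
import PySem

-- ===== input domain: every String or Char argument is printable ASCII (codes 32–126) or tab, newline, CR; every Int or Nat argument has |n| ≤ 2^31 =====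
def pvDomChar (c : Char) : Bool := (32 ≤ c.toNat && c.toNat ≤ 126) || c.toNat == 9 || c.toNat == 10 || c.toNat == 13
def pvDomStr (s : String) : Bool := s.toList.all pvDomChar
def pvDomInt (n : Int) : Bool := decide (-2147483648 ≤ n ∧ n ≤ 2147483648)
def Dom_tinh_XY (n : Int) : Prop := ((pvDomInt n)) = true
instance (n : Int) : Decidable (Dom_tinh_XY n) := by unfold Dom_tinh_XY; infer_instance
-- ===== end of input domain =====

-- B replaces the coupled X/Y recurrence over preallocated arrays by a single
-- second-order recurrence X[i]=2*X[i-1]+2*X[i-2] grown by append, with Y as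
-- consecutive differences of X (alternative decomposition, same cost).


-- ===== PORT A =====
-- one loop iteration: X[i] = X[i-1] + Y[i-1]; Y[i] = 3*X[i-1] + Y[i-1]
def pvStepA (XY : List Int × List Int) (i : Int) : List Int × List Int :=
  (XY.1.set i.toNat (PySem.List.pyGetD XY.1 (i-1) 0 + PySem.List.pyGetD XY.2 (i-1) 0),
   XY.2.set i.toNat (3 * PySem.List.pyGetD XY.1 (i-1) 0 + PySem.List.pyGetD XY.2 (i-1) 0))

def tinh_XY (n : Int) : List Int × List Int :=
  let X := (List.replicate (n+1).toNat 0).set 0 1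
  let Y := (List.replicate (n+1).toNat 0).set 0 0
  (PySem.List.pyRange 1 (n+1) 1).foldl pvStepA (X, Y)

-- ===== PORT B =====
-- one iteration: xx.append(2*xx[-1] + 2*xx[-2])
def pvStepB (xs : List Int) (_ : Nat) : List Int :=
  xs ++ [2 * (PySem.List.pyGet? xs (-1)).getD 0 + 2 * (PySem.List.pyGet? xs (-2)).getD 0]

def tinh_XY_alt (n : Int) : List Int × List Int :=
  if n < 0 then ([], [])
  else
    let xx := (List.range n.toNat).foldl pvStepB [1, 1]
    (PySem.List.slice xx none (some (n+1)),
     (PySem.List.pyRange 0 (n+1) 1).map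
       (fun i => PySem.List.pyGetD xx (i+1) 0 - PySem.List.pyGetD xx i 0))

-- ===== PRECONDITION & SPEC =====
-- A raises IndexError (X[0] = 1 on an empty list) for n < 0; excluded.
def Pre_tinh_XY (n : Int) : Prop := 0 ≤ n
instance (n : Int) : Decidable (Pre_tinh_XY n) := by unfold Pre_tinh_XY; infer_instance
def pvWitness_tinh_XY : Int := 4

-- For n < 0 A raises IndexError while B returns ([], []).
def Raises_tinh_XY (n : Int) : Prop := n < 0
instance (n : Int) : Decidable (Raises_tinh_XY n) := by unfold Raises_tinh_XY; infer_instance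
def pvRaiseWitness_tinh_XY : Int := -1
def pvRaiseWitnessOut_tinh_XY : List Int × List Int := ([], [])

def Spec_tinh_XY (n : Int) (out : List Int × List Int) : Prop := out = tinh_XY_alt n
instance (n : Int) (out : List Int × List Int) : Decidable (Spec_tinh_XY n out) := by unfold Spec_tinh_XY; infer_instance

-- ===== CLAIM (what is proved, stated in full; the proofs are below) =====
def Claim_equal_tinh_XY : Prop := ∀ (n : Int), Dom_tinh_XY n → Pre_tinh_XY n → Spec_tinh_XY n (tinh_XY n)
def Claim_raises_tinh_XY : Prop := (∀ (n : Int), Dom_tinh_XY n → Raises_tinh_XY n → ¬ Pre_tinh_XY n) ∧ (Dom_tinh_XY (pvRaiseWitness_tinh_XY) ∧ Raises_tinh_XY (pvRaiseWitness_tinh_XY) ∧ tinh_XY_alt (pvRaiseWitness_tinh_XY) = pvRaiseWitnessOut_tinh_XY)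

-- ===== LEMMAS AND PROOFS =====
-- the exact sequence: pvF k = (X[k], Y[k])
def pvF : Nat → Int × Int
  | 0 => (1, 0)
  | k+1 => ((pvF k).1 + (pvF k).2, 3 * (pvF k).1 + (pvF k).2)

def pvXs (j : Nat) : List Int := (List.range j).map (fun k => (pvF k).1)
def pvYs (j : Nat) : List Int := (List.range j).map (fun k => (pvF k).2)

lemma pvF_x2 (m : Nat) : (pvF (m+2)).1 = 2 * (pvF (m+1)).1 + 2 * (pvF m).1 := by
  simp [pvF]; ring

lemma pvF_diff (k : Nat) : (pvF (k+1)).1 - (pvF k).1 = (pvF k).2 := by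
  simp [pvF]

lemma pvXs_succ (j : Nat) : pvXs (j+1) = pvXs j ++ [(pvF j).1] := by
  simp [pvXs, List.range_succ]

lemma pvYs_succ (j : Nat) : pvYs (j+1) = pvYs j ++ [(pvF j).2] := by
  simp [pvYs, List.range_succ]

lemma pvXs_len (j : Nat) : (pvXs j).length = j := by simp [pvXs]
lemma pvYs_len (j : Nat) : (pvYs j).length = j := by simp [pvYs]

lemma pvXs_getD (j k : Nat) (hk : k < j) : (pvXs j).getD k 0 = (pvF k).1 := by
  simp [pvXs, List.getD_eq_getElem?_getD, hk]

lemma pvYs_getD (j k : Nat) (hk : k < j) : (pvYs j).getD k 0 = (pvF k).2 := by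
  simp [pvYs, List.getD_eq_getElem?_getD, hk]

lemma set_prefix (xs : List Int) (t : Nat) (v : Int) (ht : 0 < t) :
    (xs ++ List.replicate t 0).set xs.length v = (xs ++ [v]) ++ List.replicate (t-1) 0 := by
  obtain ⟨t', rfl⟩ : ∃ t', t = t' + 1 := ⟨t - 1, by omega⟩
  rw [List.replicate_succ, List.set_append]
  simp

lemma loopA (N : Nat) : ∀ j, j ≤ N →
    (((List.range j).map (fun k : Nat => (1:Int) + (k:Int))).foldl pvStepA
      (pvXs 1 ++ List.replicate N 0, pvYs 1 ++ List.replicate N 0))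
    = (pvXs (j+1) ++ List.replicate (N - j) 0, pvYs (j+1) ++ List.replicate (N - j) 0) := by
  intro j
  induction j with
  | zero => intro _; rfl
  | succ j ih =>
    intro hj
    rw [List.range_succ, List.map_append, List.foldl_append, ih (by omega)]
    show pvStepA _ ((1:Int) + (j:Int)) = _
    have hidx : ((1:Int) + (j:Int)) - 1 = ((j:Nat) : Int) := by ring
    have htn : ((1:Int) + (j:Int)).toNat = j + 1 := by omega
    have hgx : PySem.List.pyGetD (pvXs (j+1) ++ List.replicate (N-j) 0) ((1:Int) + (j:Int) - 1) 0 = (pvF j).1 := by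
      rw [hidx, PySem.List.pyGetD_natCast, List.getD_append _ _ _ _ (by rw [pvXs_len]; omega), pvXs_getD _ _ (by omega)]
    have hgy : PySem.List.pyGetD (pvYs (j+1) ++ List.replicate (N-j) 0) ((1:Int) + (j:Int) - 1) 0 = (pvF j).2 := by
      rw [hidx, PySem.List.pyGetD_natCast, List.getD_append _ _ _ _ (by rw [pvYs_len]; omega), pvYs_getD _ _ (by omega)]
    rw [pvStepA]
    simp only [hgx, hgy, htn]
    have hsx : (pvXs (j+1) ++ List.replicate (N-j) 0).set (j+1) ((pvF j).1 + (pvF j).2)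
        = pvXs (j+2) ++ List.replicate (N-(j+1)) 0 := by
      have := set_prefix (pvXs (j+1)) (N-j) ((pvF j).1 + (pvF j).2) (by omega)
      rw [pvXs_len] at this
      have hv : (pvF j).1 + (pvF j).2 = (pvF (j+1)).1 := by simp [pvF]
      rw [this, hv, ← pvXs_succ]
      have h2 : N - j - 1 = N - (j+1) := by omega
      rw [h2]
    have hsy : (pvYs (j+1) ++ List.replicate (N-j) 0).set (j+1) (3 * (pvF j).1 + (pvF j).2)
        = pvYs (j+2) ++ List.replicate (N-(j+1)) 0 := by
      have := set_prefix (pvYs (j+1)) (N-j) (3 * (pvF j).1 + (pvF j).2) (by omega)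
      rw [pvYs_len] at this
      have hv : 3 * (pvF j).1 + (pvF j).2 = (pvF (j+1)).2 := by simp [pvF]
      rw [this, hv, ← pvYs_succ]
      have h2 : N - j - 1 = N - (j+1) := by omega
      rw [h2]
    rw [hsx, hsy]

lemma loopB (m : Nat) : (List.range m).foldl pvStepB [1, 1] = pvXs (m+2) := by
  induction m with
  | zero => simp [pvXs, List.range_succ, pvF]
  | succ m ih =>
    rw [List.range_succ, List.foldl_append, ih]
    show pvStepB (pvXs (m+2)) m = pvXs (m+3)
    have h1 : PySem.List.pyGet? (pvXs (m+2)) (-1) = some ((pvF (m+1)).1) := by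
      rw [pvXs_succ]
      exact PySem.List.pyGet?_neg_one_append_singleton _ _
    have h2 : PySem.List.pyGet? (pvXs (m+2)) (-2) = some ((pvF m).1) := by
      rw [PySem.List.pyGet?_neg_ofNat (pvXs (m+2)) 2 (by omega) (by rw [pvXs_len]; omega)]
      simp [pvXs]
    rw [pvStepB, h1, h2]
    simp only [Option.getD_some]
    rw [← pvF_x2, ← pvXs_succ]

lemma tinh_XY_eq (N : Nat) : tinh_XY (N : Int) = (pvXs (N+1), pvYs (N+1)) := by
  rw [tinh_XY]
  have h1 : ((N : Int) + 1).toNat = N + 1 := by omega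
  have hX : (List.replicate ((N : Int)+1).toNat (0:Int)).set 0 1 = pvXs 1 ++ List.replicate N 0 := by
    rw [h1, List.replicate_succ]
    simp [pvXs, List.range_succ, pvF]
  have hY : (List.replicate ((N : Int)+1).toNat (0:Int)).set 0 0 = pvYs 1 ++ List.replicate N 0 := by
    rw [h1, List.replicate_succ]
    simp [pvYs, List.range_succ, pvF]
  have hr : PySem.List.pyRange 1 ((N : Int)+1) = (List.range N).map (fun k : Nat => (1:Int) + (k:Int)) := by
    have h : ((N:Int)+1) - 1 = (N:Int) := by ring
    rw [PySem.List.pyRange_one, h, Int.toNat_natCast]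
  simp only [hX, hY, hr]
  have := loopA N N (le_refl N)
  simp only [Nat.sub_self, List.replicate_zero, List.append_nil] at this
  exact this

lemma tinh_XY_alt_eq (N : Nat) : tinh_XY_alt (N : Int) = (pvXs (N+1), pvYs (N+1)) := by
  rw [tinh_XY_alt, if_neg (by omega)]
  have hx : (N : Int).toNat = N := Int.toNat_natCast N
  rw [hx, loopB]
  refine Prod.ext ?_ ?_
  · show PySem.List.slice (pvXs (N+2)) none (some ((N : Int)+1)) = pvXs (N+1)
    have : ((N : Int) + 1) = ((N+1 : Nat) : Int) := by push_cast; ring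
    rw [this, PySem.List.slice_to_natCast]
    simp [pvXs, ← List.map_take, List.take_range]
  · show (PySem.List.pyRange 0 ((N : Int)+1)).map _ = pvYs (N+1)
    have : ((N : Int) + 1) = ((N+1 : Nat) : Int) := by push_cast; ring
    rw [this, PySem.List.pyRange_zero_nat, List.map_map, pvYs]
    refine List.map_congr_left ?_
    intro k hk
    simp only [List.mem_range] at hk
    show PySem.List.pyGetD (pvXs (N+2)) ((k : Int)+1) 0 - PySem.List.pyGetD (pvXs (N+2)) (k : Int) 0 = (pvF k).2
    have h1 : ((k : Int) + 1) = ((k+1 : Nat) : Int) := by push_cast; ring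
    rw [h1, PySem.List.pyGetD_natCast, PySem.List.pyGetD_natCast,
        pvXs_getD _ _ (by omega), pvXs_getD _ _ (by omega), pvF_diff]

-- ===== VERDICT (by name: the statement is the Claim_ definition above) =====
theorem tinh_XY_spec : Claim_equal_tinh_XY := by
  intro n _ hpre
  unfold Spec_tinh_XY
  obtain ⟨N, rfl⟩ := Int.eq_ofNat_of_zero_le hpre
  rw [tinh_XY_eq, tinh_XY_alt_eq]

@[simp] theorem tinh_XY_raises : Claim_raises_tinh_XY := by
  unfold Claim_raises_tinh_XY
  exact ⟨fun n _ h => by unfold Raises_tinh_XY at h; unfold Pre_tinh_XY; omega, by decide⟩
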